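-- pv_equiv track=rewrite | github.com/Damodharan28/coding-problems | leetcode-solutions/440_K-th_Smallest_in_Lexicographical_Order.py | countPrefix
-- ===== SOURCE A (Python) =====
-- def countPrefix(prefix,n):
--     f_num = prefix
--     n_num = prefix + 1
--     total_cnt = 0
--
--     while f_num <= n :
--         total_cnt += min(n+1, n_num) - f_num
--         f_num *= 10
--         n_num *= 10
--
--     return total_cnt
-- ===== SOURCE B (Python) =====
-- def countPrefix(prefix, n):
--     if n < prefix:
--         return 0
--     # number of levels below the last: digit-length difference, corrected down
--     # if prefix shifted to n's length overshoots n
--     t = len(str(n)) - len(str(prefix))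
--     if prefix * 10 ** t > n:
--         t -= 1
--     full = (10 ** t - 1) // 9          # one node per full level: 1 + 10 + ... + 10**(t-1)
--     return full + min(n + 1, (prefix + 1) * 10 ** t) - prefix * 10 ** t
-- ===== Notes on version B (the rewrite author's own statement) =====
-- stated objective: alternative
-- what changed: Replaces A's level-by-level accumulating while loop with a closed form: digit-length difference of str(n) and str(prefix) gives the tree depth, full levels are summed as the repunit (10**t - 1)//9, and only the last level is clamped with min.
import Mathlib
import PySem

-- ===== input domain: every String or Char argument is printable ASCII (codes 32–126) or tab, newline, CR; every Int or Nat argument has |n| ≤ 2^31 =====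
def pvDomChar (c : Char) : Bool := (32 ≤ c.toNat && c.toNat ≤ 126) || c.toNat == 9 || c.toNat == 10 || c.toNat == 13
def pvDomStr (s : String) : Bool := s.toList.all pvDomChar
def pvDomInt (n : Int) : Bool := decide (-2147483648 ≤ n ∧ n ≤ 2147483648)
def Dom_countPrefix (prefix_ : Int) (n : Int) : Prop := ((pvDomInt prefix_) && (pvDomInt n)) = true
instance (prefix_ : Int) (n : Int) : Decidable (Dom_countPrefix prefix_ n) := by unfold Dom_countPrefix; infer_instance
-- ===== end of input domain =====

-- ===== PORT A =====
-- B re-implements A's level-by-level loop as a closed form from digit lengths (objective: alternative).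
-- A's while loop never terminates when prefix_ <= 0 <= n (f_num*10 never exceeds n); the extra
-- '1 <= f_num' conjunct below is a pure totality guard, only reachable outside Pre_countPrefix.
def countPrefixLoop (n f_num n_num total_cnt : Int) : Int :=
  if _h : f_num ≤ n ∧ 1 ≤ f_num then
    countPrefixLoop n (f_num * 10) (n_num * 10) (total_cnt + (min (n + 1) n_num - f_num))
  else total_cnt
termination_by (n + 1 - f_num).toNat
decreasing_by omega

def countPrefix (prefix_ : Int) (n : Int) : Int :=
  countPrefixLoop n prefix_ (prefix_ + 1) 0

-- ===== PORT B =====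
-- Inside Pre_ the exponent t is nonnegative, so '10 ** t' is ported as '10 ^ t.toNat' (exact there;
-- for negative t Python would produce a float, reachable only outside Pre_).
def countPrefix_alt (prefix_ : Int) (n : Int) : Int :=
  if n < prefix_ then 0
  else
    let t0 : Int := PySem.Str.len (PySem.Int.toStr n) - PySem.Str.len (PySem.Int.toStr prefix_)
    let t : Int := if prefix_ * 10 ^ t0.toNat > n then t0 - 1 else t0
    let full : Int := PySem.Int.floordiv (10 ^ t.toNat - 1) 9
    full + (min (n + 1) ((prefix_ + 1) * 10 ^ t.toNat) - prefix_ * 10 ^ t.toNat)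

-- ===== PRECONDITION & SPEC =====
-- Pre_ excludes exactly the inputs where Python A diverges (infinite while loop):
-- prefix <= 0 with prefix <= n keeps f_num <= n forever, so A never returns there.
def Pre_countPrefix (prefix_ : Int) (n : Int) : Prop := 1 ≤ prefix_ ∨ n < prefix_
instance (prefix_ : Int) (n : Int) : Decidable (Pre_countPrefix prefix_ n) := by
  unfold Pre_countPrefix; infer_instance

def pvWitness_countPrefix : Int × Int := (3, 45)

def Spec_countPrefix (prefix_ : Int) (n : Int) (out : Int) : Prop := out = countPrefix_alt prefix_ n
instance (prefix_ : Int) (n : Int) (out : Int) : Decidable (Spec_countPrefix prefix_ n out) := by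
  unfold Spec_countPrefix; infer_instance

-- ===== CLAIM (what is proved, stated in full; the proofs are below) =====
def Claim_equal_countPrefix : Prop := ∀ (prefix_ : Int) (n : Int), Dom_countPrefix prefix_ n → Pre_countPrefix prefix_ n → Spec_countPrefix prefix_ n (countPrefix prefix_ n)

-- ===== LEMMAS AND PROOFS =====

-- exact length of Nat.toDigitsCore (Mathlib only provides an upper bound)
lemma toDigitsCore_len_exact : ∀ (f n : Nat), 0 < n → n < f →
    (Nat.toDigitsCore 10 f n []).length = Nat.log 10 n + 1 := by
  intro f
  induction f with
  | zero => intro n h1 h2; omega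
  | succ f ih =>
    intro n h1 h2
    rw [Nat.toDigitsCore]
    by_cases hx : n / 10 = 0
    · have hn : n < 10 := by omega
      simp [hx, Nat.log_eq_zero_iff, hn]
    · have hn : 10 ≤ n := by omega
      simp only [hx, reduceIte]
      rw [Nat.toDigitsCore_lens_eq]
      rw [ih (n / 10) (by omega) (by omega)]
      have := Nat.log_div_base 10 n
      have := Nat.log_pos (b := 10) (n := n) (by norm_num) hn
      omega

-- digit-length of str(m) for positive m
lemma toChars_len (m : Int) (hm : 1 ≤ m) :
    (PySem.Int.toChars m).length = Nat.log 10 m.toNat + 1 := by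
  unfold PySem.Int.toChars
  rw [if_neg (by omega)]
  exact toDigitsCore_len_exact (m.toNat + 1) m.toNat (by omega) (by omega)

-- the repunit (10^t - 1)/9 computed by floordiv, and its recurrence
lemma nine_dvd_pow_sub_one (t : Nat) : (9 : Int) ∣ 10 ^ t - 1 := by
  induction t with
  | zero => simp
  | succ t ih =>
    have : (10 : Int) ^ (t + 1) - 1 = 10 * (10 ^ t - 1) + 9 := by ring
    rw [this]
    exact Dvd.dvd.add (Dvd.dvd.mul_left ih 10) ⟨1, by ring⟩

lemma floordiv_repunit (t : Nat) :
    9 * PySem.Int.floordiv ((10 : Int) ^ t - 1) 9 = 10 ^ t - 1 := by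
  unfold PySem.Int.floordiv
  have hd := nine_dvd_pow_sub_one t
  rw [Int.fdiv_eq_ediv, if_pos (Or.inl (by norm_num)), sub_zero]
  omega

lemma repunit_succ (t : Nat) :
    PySem.Int.floordiv ((10 : Int) ^ (t + 1) - 1) 9 =
      10 * PySem.Int.floordiv ((10 : Int) ^ t - 1) 9 + 1 := by
  have h1 := floordiv_repunit t
  have h2 := floordiv_repunit (t + 1)
  have : (10 : Int) ^ (t + 1) = 10 * 10 ^ t := by ring
  omega

lemma repunit_zero : PySem.Int.floordiv ((10 : Int) ^ 0 - 1) 9 = 0 := by decide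

-- closed form of A's loop, by induction on the number of full levels below the last
lemma loop_closed : ∀ (t : Nat) (f w acc n : Int), 1 ≤ w → w ≤ f → f ≤ n →
    f * 10 ^ t ≤ n → n < f * 10 ^ (t + 1) →
    countPrefixLoop n f (f + w) acc =
      acc + w * PySem.Int.floordiv ((10 : Int) ^ t - 1) 9 +
        (min (n + 1) ((f + w) * 10 ^ t) - f * 10 ^ t) := by
  intro t
  induction t with
  | zero =>
    intro f w acc n hw hwf hfn _ htop
    rw [countPrefixLoop, dif_pos ⟨hfn, by omega⟩]
    rw [countPrefixLoop, dif_neg (by norm_num at htop; omega)]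
    rw [repunit_zero]
    simp only [pow_zero, mul_one, mul_zero, add_zero]
  | succ t ih =>
    intro f w acc n hw hwf hfn hle htop
    have hf10 : f * 10 ≤ n := by
      have h1 : (10 : Int) ≤ 10 ^ (t + 1) := by
        calc (10 : Int) = 10 ^ 1 := (pow_one 10).symm
        _ ≤ 10 ^ (t + 1) := by
              exact pow_le_pow_right₀ (by norm_num) (by omega)
      nlinarith
    rw [countPrefixLoop, dif_pos ⟨hfn, by omega⟩]
    have hmin : min (n + 1) (f + w) = f + w := by omega
    have hstep : (f + w) * 10 = f * 10 + w * 10 := by ring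
    rw [hstep]
    rw [ih (f * 10) (w * 10) (acc + (min (n + 1) (f + w) - f)) n (by omega) (by omega) hf10
        (by have : f * 10 * 10 ^ t = f * 10 ^ (t + 1) := by ring
            omega)
        (by have : f * 10 * 10 ^ (t + 1) = f * 10 ^ (t + 1 + 1) := by ring
            omega)]
    rw [hmin, repunit_succ]
    have he1 : (f * 10 + w * 10) * 10 ^ t = (f + w) * 10 ^ (t + 1) := by ring
    have he2 : f * 10 * 10 ^ t = f * 10 ^ (t + 1) := by ring
    rw [he1, he2]
    ring

-- the main equivalence
theorem countPrefix_eq_alt (prefix_ n : Int) (_hd : Dom_countPrefix prefix_ n)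
    (hpre : Pre_countPrefix prefix_ n) : countPrefix prefix_ n = countPrefix_alt prefix_ n := by
  unfold countPrefix countPrefix_alt
  by_cases hlt : n < prefix_
  · rw [countPrefixLoop, dif_neg (by omega), if_pos hlt]
  · have hp1 : 1 ≤ prefix_ := by unfold Pre_countPrefix at hpre; omega
    have hpn : prefix_ ≤ n := by omega
    rw [if_neg hlt]
    -- digit lengths
    have hn1 : 1 ≤ n := by omega
    simp only [PySem.Str.len, PySem.Int.toList_toStr]
    rw [toChars_len n hn1, toChars_len prefix_ hp1]
    set a := Nat.log 10 n.toNat with ha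
    set b := Nat.log 10 prefix_.toNat with hb
    have hab : b ≤ a := Nat.log_mono_right (by omega)
    have hcast : ((↑(a + 1) : Int) - ↑(b + 1)).toNat = a - b := by omega
    -- bounds from logs, cast to Int
    have hpl : (10 : Int) ^ b ≤ prefix_ := by
      have := Nat.pow_log_le_self 10 (x := prefix_.toNat) (by omega)
      have : ((10 : Nat) ^ b : Int) ≤ (prefix_.toNat : Int) := by exact_mod_cast this
      push_cast at this; omega
    have hpu : prefix_ < (10 : Int) ^ (b + 1) := by
      have := Nat.lt_pow_succ_log_self (b := 10) (by norm_num) prefix_.toNat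
      have : (prefix_.toNat : Int) < ((10 : Nat) ^ (b + 1) : Int) := by exact_mod_cast this
      push_cast at this; omega
    have hnl : (10 : Int) ^ a ≤ n := by
      have := Nat.pow_log_le_self 10 (x := n.toNat) (by omega)
      have : ((10 : Nat) ^ a : Int) ≤ (n.toNat : Int) := by exact_mod_cast this
      push_cast at this; omega
    have hnu : n < (10 : Int) ^ (a + 1) := by
      have := Nat.lt_pow_succ_log_self (b := 10) (by norm_num) n.toNat
      have : (n.toNat : Int) < ((10 : Nat) ^ (a + 1) : Int) := by exact_mod_cast this
      push_cast at this; omega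
    rw [hcast]
    by_cases hcase : prefix_ * 10 ^ (a - b) > n
    · -- corrected level: t = a - b - 1
      have habs : b < a := by
        rcases Nat.eq_or_lt_of_le hab with h | h
        · exfalso; rw [h] at hcase; simp at hcase; omega
        · exact h
      rw [if_pos hcase]
      have htn : ((↑(a + 1) : Int) - ↑(b + 1) - 1).toNat = a - b - 1 := by omega
      rw [htn]
      have hsplit : a - b = (a - b - 1) + 1 := by omega
      have hup : n < prefix_ * 10 ^ (a - b - 1 + 1) := by rw [← hsplit]; exact hcase
      have hlo : prefix_ * 10 ^ (a - b - 1) ≤ n := by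
        have h1 : prefix_ * 10 ^ (a - b - 1) < 10 ^ (b + 1) * 10 ^ (a - b - 1) := by
          have hpos : (0 : Int) < 10 ^ (a - b - 1) := by positivity
          nlinarith
        have h2 : (10 : Int) ^ (b + 1) * 10 ^ (a - b - 1) = 10 ^ a := by
          rw [← pow_add]; congr 1; omega
        omega
      have hloop := loop_closed (a - b - 1) prefix_ 1 0 n (by omega) hp1 hpn hlo hup
      rw [show prefix_ + 1 = prefix_ + 1 from rfl] at hloop
      rw [hloop]
      ring
    · rw [if_neg hcase]
      rw [hcast]
      replace hcase := not_lt.mp hcase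
      have hup : n < prefix_ * 10 ^ (a - b + 1) := by
        have h1 : (10 : Int) ^ b * 10 ^ (a - b + 1) = 10 ^ (a + 1) := by
          rw [← pow_add]; congr 1; omega
        have hpos : (0 : Int) < 10 ^ (a - b + 1) := by positivity
        nlinarith
      have hloop := loop_closed (a - b) prefix_ 1 0 n (by omega) hp1 hpn hcase hup
      rw [hloop]
      ring

-- ===== VERDICT (by name: the statement is the Claim_ definition above) =====
theorem countPrefix_spec : Claim_equal_countPrefix := by
  intro prefix_ n hd hpre
  unfold Spec_countPrefix
  exact countPrefix_eq_alt prefix_ n hd hpre
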